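-- pv_equiv track=rewrite | github.com/philipwastakenwastaken/ML_Exam_Scripts | sim.py | f11_diff
-- ===== SOURCE A (Python) =====
-- def f11_diff(a, b):
--     count = 0
--     v_list = [a, b]
--     for v in v_list:
--         for indx, o1 in enumerate(v):
--             for i in range(indx + 1, len(v)):
--                 if o1 == v[i]:
--                     count += 1
--     return count
-- ===== SOURCE B (Python) =====
-- def f11_diff(a, b):
--     total = 0
--     for v in (a, b):
--         freq = {}
--         for x in v:
--             freq[x] = freq.get(x, 0) + 1
--         for k in freq.values():
--             total += k * (k - 1) // 2
--     return total
-- ===== Notes on version B (the rewrite author's own statement) =====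
-- stated objective: faster
-- what changed: Replaces the O(n^2) all-pairs double scan per list with a single frequency-counting pass per list, summing k*(k-1)//2 over each count.
import Mathlib
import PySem

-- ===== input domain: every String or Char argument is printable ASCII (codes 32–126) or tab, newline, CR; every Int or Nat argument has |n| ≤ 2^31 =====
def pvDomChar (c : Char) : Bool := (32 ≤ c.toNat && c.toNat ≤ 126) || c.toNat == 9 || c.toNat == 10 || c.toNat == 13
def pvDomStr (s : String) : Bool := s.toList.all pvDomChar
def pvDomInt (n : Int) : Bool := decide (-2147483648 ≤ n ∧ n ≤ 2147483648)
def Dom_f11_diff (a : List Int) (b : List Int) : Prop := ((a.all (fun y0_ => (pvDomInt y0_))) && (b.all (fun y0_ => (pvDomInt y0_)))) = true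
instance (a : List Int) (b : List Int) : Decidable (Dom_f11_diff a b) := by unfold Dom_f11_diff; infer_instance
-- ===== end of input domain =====

-- B replaces A's O(n^2) all-pairs double scan per list by a single frequency-counting pass,
-- summing k*(k-1)//2 over the counts (objective: faster, asymptotically).

-- ===== PORT A =====
def f11_diff (a : List Int) (b : List Int) : Int :=
  ([a, b] : List (List Int)).foldl (fun count v =>
    (PySem.List.enumerate v).foldl (fun count p =>
      (PySem.List.pyRange (p.1 + 1) (PySem.List.len v)).foldl (fun count i =>
        -- v[i]: every i produced by range(indx+1, len(v)) is in range, so pyGetD is exact here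
        if PySem.List.pyGetD v i 0 == p.2 then count + 1 else count) count) count) 0

-- ===== PORT B =====
def f11_diff_alt (a : List Int) (b : List Int) : Int :=
  ([a, b] : List (List Int)).foldl (fun total v =>
    let freq : PySem.Dict Int Int :=
      v.foldl (fun d x => d.insert x (d.getD x 0 + 1)) PySem.Dict.empty
    freq.values.foldl (fun total k => total + PySem.Int.floordiv (k * (k - 1)) 2) total) 0

-- ===== PRECONDITION & SPEC =====
def Spec_f11_diff (a : List Int) (b : List Int) (out : Int) : Prop := out = f11_diff_alt a b
instance (a : List Int) (b : List Int) (out : Int) : Decidable (Spec_f11_diff a b out) := by unfold Spec_f11_diff; infer_instance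

-- ===== CLAIM (what is proved, stated in full; the proofs are below) =====
def Claim_equal_f11_diff : Prop := ∀ (a : List Int) (b : List Int), Dom_f11_diff a b → Spec_f11_diff a b (f11_diff a b)

-- ===== LEMMAS AND PROOFS =====

-- number of equal unordered pairs inside one list, as a structural recursion
def pairsN : List Int → Nat
  | [] => 0
  | x :: xs => xs.count x + pairsN xs

-- the Finset characterisation: sum of C(count,2) over the distinct elements
lemma finSum : ∀ v : List Int, (∑ y ∈ v.toFinset, (v.count y).choose 2) = pairsN v := by
  intro v
  induction v with
  | nil => simp [pairsN]
  | cons x xs ih =>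
    by_cases hx : x ∈ xs
    · have hts : (x :: xs).toFinset = xs.toFinset := by
        simp [List.toFinset_cons, hx]
      have hpt : ∀ y ∈ xs.toFinset, ((x :: xs).count y).choose 2
          = (xs.count y).choose 2 + if y = x then xs.count x else 0 := by
        intro y _
        by_cases hyx : y = x
        · subst hyx
          have : (y :: xs).count y = xs.count y + 1 := by simp
          rw [this]
          have h2 : (xs.count y + 1).choose 2 = xs.count y + (xs.count y).choose 2 := by
            rw [Nat.choose_succ_succ, Nat.choose_one_right]
          simp [h2]; omega
        · have hxy : ¬ x = y := fun h => hyx h.symm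
          have hc : (x :: xs).count y = xs.count y := by
            simp [hxy]
          simp [hc, hyx]
      rw [hts, Finset.sum_congr rfl hpt, Finset.sum_add_distrib, ih]
      have hxt : x ∈ xs.toFinset := by simpa using hx
      rw [Finset.sum_ite_eq' xs.toFinset x (fun _ => xs.count x)]
      simp [hxt, pairsN]; omega
    · have hxt : x ∉ xs.toFinset := by simpa using hx
      rw [List.toFinset_cons, Finset.sum_insert hxt]
      have hcx : (x :: xs).count x = 1 := by
        simp [List.count_eq_zero_of_not_mem hx]
      have hrest : ∀ y ∈ xs.toFinset, ((x :: xs).count y).choose 2 = (xs.count y).choose 2 := by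
        intro y hy
        have hxy : ¬ x = y := by rintro rfl; exact hxt hy
        simp [hxy]
      rw [hcx, Finset.sum_congr rfl hrest, ih]
      simp [pairsN, List.count_eq_zero_of_not_mem hx]

-- A's per-list nested scan, generalised over an already-consumed prefix u
lemma stepA : ∀ (v u : List Int) (c : Int),
    (PySem.List.enumerate v ((u.length : Int))).foldl (fun count p =>
      (PySem.List.pyRange (p.1 + 1) (PySem.List.len (u ++ v))).foldl (fun count i =>
        if PySem.List.pyGetD (u ++ v) i 0 == p.2 then count + 1 else count) count) c
    = c + (pairsN v : Int) := by
  intro v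
  induction v with
  | nil => intro u c; simp [PySem.List.enumerate, pairsN]
  | cons x xs ih =>
    intro u c
    have hcons : PySem.List.enumerate (x :: xs) ((u.length : Int))
        = ((u.length : Int), x) :: PySem.List.enumerate xs ((u.length : Int) + 1) := by
      simp [PySem.List.enumerate]
    rw [hcons, List.foldl_cons]
    -- head: the range scan counts x in the tail xs
    have hhead : (PySem.List.pyRange (((u.length : Int)) + 1) (PySem.List.len (u ++ x :: xs))).foldl
        (fun count i => if PySem.List.pyGetD (u ++ x :: xs) i 0 == x then count + 1 else count) c
        = c + (xs.count x : Int) := by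
      have h0 : (0 : Int) ≤ (u.length : Int) + 1 := by positivity
      have := PySem.List.foldl_pyRange_pyGetD (u ++ x :: xs) 0
        (fun count y => if y == x then count + 1 else count) c h0
      rw [this]
      have hdrop : ((u.length : Int) + 1).toNat = u.length + 1 := by omega
      have : (u ++ x :: xs).drop (u.length + 1) = xs := by
        have : u ++ x :: xs = (u ++ [x]) ++ xs := by simp
        rw [this]
        have hl : (u ++ [x]).length = u.length + 1 := by simp
        rw [← hl, List.drop_left]
      rw [hdrop, this, PySem.List.foldl_count_if]
      simp [List.count]
    rw [hhead]
    -- tail: shift the prefix by one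
    have hsh : (u.length : Int) + 1 = (((u ++ [x]).length : Int)) := by simp
    have hls : u ++ x :: xs = (u ++ [x]) ++ xs := by simp
    rw [hsh, hls, ih (u ++ [x]) (c + (xs.count x : Int))]
    simp [pairsN]; ring

-- A's per-list scan in exactly the port's shape
lemma stepA0 (v : List Int) (c : Int) :
    (PySem.List.enumerate v).foldl (fun count p =>
      (PySem.List.pyRange (p.1 + 1) (PySem.List.len v)).foldl (fun count i =>
        if PySem.List.pyGetD v i 0 == p.2 then count + 1 else count) count) c
    = c + (pairsN v : Int) := by
  have h := stepA v [] c
  simpa using h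

-- B's per-list frequency pass
lemma stepB : ∀ (v : List Int) (t : Int),
    ((v.foldl (fun d x => d.insert x (d.getD x 0 + 1)) (PySem.Dict.empty : PySem.Dict Int Int)).values).foldl
      (fun total k => total + PySem.Int.floordiv (k * (k - 1)) 2) t
    = t + (pairsN v : Int) := by
  intro v t
  rw [PySem.Dict.foldl_insert_getD_add_one_eq_counter]
  rw [PySem.Dict.values_eq_map_keys _ (PySem.Dict.nodup_keys_counter v) 0]
  rw [PySem.Dict.keys_counter]
  have hmap : (PySem.Set.ofList v).map (fun k => (PySem.Dict.counter v).getD k 0)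
      = (PySem.Set.ofList v).map (fun k => ((v.count k : Int))) := by
    apply List.map_congr_left; intro y _; exact PySem.Dict.getD_counter v y
  rw [hmap, PySem.List.foldl_add]
  have hC2 : ∀ n : Nat, PySem.Int.floordiv ((n : Int) * ((n : Int) - 1)) 2 = (n.choose 2 : Int) := by
    intro n
    cases n with
    | zero => simp [PySem.Int.floordiv]
    | succ m =>
      have : ((m + 1 : Nat) : Int) * (((m + 1 : Nat) : Int) - 1) = (((m + 1) * m : Nat) : Int) := by
        push_cast; ring
      rw [this]
      have hch : (m + 1).choose 2 = (m + 1) * m / 2 := by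
        rw [Nat.choose_two_right]; simp
      rw [hch]
      exact_mod_cast PySem.Int.floordiv_natCast ((m + 1) * m) 2
  have hcomp : ((PySem.Set.ofList v).map (fun k => ((v.count k : Int)))).map
      (fun k => PySem.Int.floordiv (k * (k - 1)) 2)
      = (PySem.Set.ofList v).map (fun k => ((v.count k).choose 2 : Int)) := by
    rw [List.map_map]
    apply List.map_congr_left; intro y _
    exact hC2 (v.count y)
  rw [hcomp]
  have hts : ((PySem.Set.ofList v : List Int)).toFinset = v.toFinset := by
    ext y; simp [PySem.Set.mem_ofList]
  have hsum : ((PySem.Set.ofList v).map (fun k => ((v.count k).choose 2 : Int))).sum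
      = ((∑ y ∈ v.toFinset, (v.count y).choose 2 : Nat) : Int) := by
    rw [← List.sum_toFinset _ (PySem.Set.nodup_ofList v), hts]
    push_cast
    rfl
  rw [hsum, finSum]

-- ===== VERDICT (by name: the statement is the Claim_ definition above) =====
theorem f11_diff_spec : Claim_equal_f11_diff := by
  intro a b _
  unfold Spec_f11_diff f11_diff f11_diff_alt
  simp only [List.foldl_cons, List.foldl_nil]
  rw [stepA0 a 0, zero_add, stepA0 b ((pairsN a : Int))]
  rw [stepB a 0, zero_add, stepB b ((pairsN a : Int))]
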